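-- pv_equiv track=rewrite | github.com/jennajoyram/Jenna_Joy_python_exam | kmer_analyzer.py | get_following_counts
-- ===== SOURCE A (Python) =====
-- def get_following_counts(sequence, k):
--     """
--     For each k-mer, count the frequency of the character that immediately follows it.
--
--     Parameters:
--         sequence (str): The DNA sequence.
--         k (int): The length of the k-mer.
--
--     Returns:
--         dict: Dictionary where each key is a k-mer and each value is another dictionary
--               mapping following characters to their counts.
--     """
--     follow_counts = {}  # Nested dictionary: {kmer: {next_char: count}}
--     for i in range(len(sequence) - k):  # Stop before the last full k-mer (needs next char)
--         kmer = sequence[i:i + k]        # Get the k-mer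
--         next_char = sequence[i + k]     # Character that follows the k-mer
--
--         if kmer not in follow_counts:
--             follow_counts[kmer] = {}  # Initialize nested dictionary for the k-mer
--
--         # Update the count of the next character
--         follow_counts[kmer][next_char] = follow_counts[kmer].get(next_char, 0) + 1
--
--     return follow_counts
-- ===== SOURCE B (Python) =====
-- def get_following_counts(sequence, k):
--     # Pass 0: materialize the (kmer, follower) pair at each position.
--     pairs = [(sequence[i:i + k], sequence[i + k]) for i in range(len(sequence) - k)]
--     # Pass 1: flat count of identical pairs.
--     flat = {}
--     for pair in pairs:
--         flat[pair] = flat.get(pair, 0) + 1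
--     # Pass 2: regroup the flat counts into the nested dict.
--     result = {}
--     for (kmer, ch), cnt in flat.items():
--         result.setdefault(kmer, {})[ch] = cnt
--     return result
-- ===== Notes on version B (the rewrite author's own statement) =====
-- stated objective: alternative
-- what changed: A builds the nested counts in a single pass, updating an inner dict per position; B materializes the (kmer, follower) pair at each position, counts identical pairs in one flat dict, then regroups the flat counts into the nested dict in a separate pass.
-- outside the precondition, e.g. on get_following_counts('AC', -3): A raises IndexError, B raises IndexError
import Mathlib
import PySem

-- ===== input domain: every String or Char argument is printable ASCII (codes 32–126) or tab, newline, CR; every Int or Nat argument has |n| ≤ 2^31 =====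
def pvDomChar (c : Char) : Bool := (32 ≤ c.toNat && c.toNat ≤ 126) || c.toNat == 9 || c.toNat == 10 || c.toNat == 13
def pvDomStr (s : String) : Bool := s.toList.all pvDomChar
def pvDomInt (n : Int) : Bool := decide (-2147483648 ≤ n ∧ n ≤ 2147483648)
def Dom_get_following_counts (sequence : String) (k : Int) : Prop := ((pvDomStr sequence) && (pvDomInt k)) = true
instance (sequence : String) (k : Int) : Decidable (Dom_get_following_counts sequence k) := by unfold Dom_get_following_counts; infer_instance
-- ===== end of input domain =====

-- B replaces A's one-pass nested-dict updating by a staged decomposition: materialize the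
-- (k-mer, follower) pair list, count identical pairs in one flat dict, then regroup the flat
-- counts into the nested dict (objective: alternative; same cost, different shape).

-- ===== PORT A =====
def get_following_counts (sequence : String) (k : Int) : List (String × List (String × Int)) :=
  let s := sequence.toList
  let follow_counts :=
    (PySem.List.pyRange 0 (PySem.List.len s - k) 1).foldl
      (fun (fc : PySem.Dict String (PySem.Dict String Int)) i =>
        let kmer := String.ofList (PySem.List.slice s (some i) (some (i + k)))
        -- sequence[i + k]: IndexError (pyGetD out of range) is excluded by Pre_
        let next_char := String.ofList [PySem.List.pyGetD s (i + k) ' ']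
        let fc1 := if fc.contains kmer then fc else fc.insert kmer PySem.Dict.empty
        let inner := fc1.getD kmer PySem.Dict.empty
        fc1.insert kmer (inner.insert next_char (inner.getD next_char 0 + 1)))
      PySem.Dict.empty
  follow_counts.items.map (fun p => (p.1, p.2.items))

-- ===== PORT B =====
def get_following_counts_alt (sequence : String) (k : Int) : List (String × List (String × Int)) :=
  let s := sequence.toList
  -- pass 0: pairs = [(sequence[i:i+k], sequence[i+k]) for i in range(len(sequence)-k)]
  let pairs : List (String × String) :=
    (PySem.List.pyRange 0 (PySem.List.len s - k) 1).map
      (fun i => (String.ofList (PySem.List.slice s (some i) (some (i + k))),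
                 String.ofList [PySem.List.pyGetD s (i + k) ' ']))
  -- pass 1: flat[pair] = flat.get(pair, 0) + 1
  let flat : PySem.Dict (String × String) Int :=
    pairs.foldl (fun d pair => d.insert pair (d.getD pair 0 + 1)) PySem.Dict.empty
  -- pass 2: result.setdefault(kmer, {})[ch] = cnt
  let result : PySem.Dict String (PySem.Dict String Int) :=
    flat.items.foldl
      (fun r q => r.modify q.1.1 PySem.Dict.empty (fun inner => inner.insert q.1.2 q.2))
      PySem.Dict.empty
  result.items.map (fun p => (p.1, p.2.items))

-- ===== PRECONDITION & SPEC =====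
-- Pre_ excludes exactly the inputs where A raises IndexError: a negative k with k < -len(sequence),
-- where sequence[i + k] is out of range already at i = 0 (B raises the same IndexError there).
def Pre_get_following_counts (sequence : String) (k : Int) : Prop :=
  -(sequence.length : Int) ≤ k
instance (sequence : String) (k : Int) : Decidable (Pre_get_following_counts sequence k) := by
  unfold Pre_get_following_counts; infer_instance
def pvWitness_get_following_counts : String × Int := ("ACGTAC", 2)

def Spec_get_following_counts (sequence : String) (k : Int) (out : List (String × List (String × Int))) : Prop := out = get_following_counts_alt sequence k
instance (sequence : String) (k : Int) (out : List (String × List (String × Int))) : Decidable (Spec_get_following_counts sequence k out) := by unfold Spec_get_following_counts; infer_instance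

-- ===== CLAIM (what is proved, stated in full; the proofs are below) =====
def Claim_equal_get_following_counts : Prop := ∀ (sequence : String) (k : Int), Dom_get_following_counts sequence k → Pre_get_following_counts sequence k → Spec_get_following_counts sequence k (get_following_counts sequence k)

-- ===== LEMMAS AND PROOFS =====

-- the (k-mer, following char) pair at each loop index, shared by both analyses
def pvPairs (s : List Char) (k : Int) : List (String × String) :=
  (PySem.List.pyRange 0 (PySem.List.len s - k) 1).map
    (fun i => (String.ofList (PySem.List.slice s (some i) (some (i + k))),
               String.ofList [PySem.List.pyGetD s (i + k) ' ']))

-- A's loop body on a precomputed pair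
def pvStepA (fc : PySem.Dict String (PySem.Dict String Int)) (p : String × String) :
    PySem.Dict String (PySem.Dict String Int) :=
  let fc1 := if fc.contains p.1 then fc else fc.insert p.1 PySem.Dict.empty
  let inner := fc1.getD p.1 PySem.Dict.empty
  fc1.insert p.1 (inner.insert p.2 (inner.getD p.2 0 + 1))

-- the characters following k-mer g, in order
def pvChars (P : List (String × String)) (g : String) : List String :=
  (P.filter (fun q => q.1 == g)).map Prod.snd

-- closed form both sides are reduced to
def pvClosed (P : List (String × String)) : PySem.Dict String (PySem.Dict String Int) :=
  PySem.Dict.mk ((PySem.Set.ofList (P.map Prod.fst)).map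
    (fun g => (g, PySem.Dict.counter (pvChars P g))))

theorem pvKeys_closed (P : List (String × String)) :
    (pvClosed P).keys = PySem.Set.ofList (P.map Prod.fst) := by
  simp [pvClosed, PySem.Dict.keys, List.map_map, Function.comp_def]

theorem pvChars_append_self (P : List (String × String)) (p : String × String) :
    pvChars (P ++ [p]) p.1 = pvChars P p.1 ++ [p.2] := by
  simp [pvChars, List.filter_append]

theorem pvChars_append_ne (P : List (String × String)) (p : String × String) (g : String)
    (h : g ≠ p.1) : pvChars (P ++ [p]) g = pvChars P g := by
  simp [pvChars, List.filter_append, h.symm]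

theorem pvChars_nil_of_not_mem (P : List (String × String)) (g : String)
    (h : g ∉ P.map Prod.fst) : pvChars P g = [] := by
  simp only [pvChars, List.map_eq_nil_iff, List.filter_eq_nil_iff]
  intro q hq hbeq
  exact h (List.mem_map.mpr ⟨q, hq, by simpa using hbeq⟩)

theorem pvStepA_closed (P : List (String × String)) (p : String × String) :
    pvStepA (pvClosed P) p = pvClosed (P ++ [p]) := by
  have hkeys := pvKeys_closed P
  have hnd : (pvClosed P).keys.Nodup := by rw [hkeys]; exact PySem.Set.nodup_ofList _
  have hcont : (pvClosed P).contains p.1 = decide (p.1 ∈ PySem.Set.ofList (P.map Prod.fst)) := by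
    rw [PySem.Dict.contains_eq_decide_mem_keys, hkeys]
  by_cases hg : p.1 ∈ P.map Prod.fst
  · -- p.1 already a key
    have hmemS : p.1 ∈ PySem.Set.ofList (P.map Prod.fst) := (PySem.Set.mem_ofList _ _).mpr hg
    have hc : (pvClosed P).contains p.1 = true := by rw [hcont]; simpa using hmemS
    have hitem : (p.1, PySem.Dict.counter (pvChars P p.1)) ∈ (pvClosed P).items := by
      simp only [pvClosed]
      exact List.mem_map.mpr ⟨p.1, hmemS, rfl⟩
    have hgetD : (pvClosed P).getD p.1 PySem.Dict.empty = PySem.Dict.counter (pvChars P p.1) :=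
      PySem.Dict.getD_of_mem_items _ hitem hnd _
    -- the updated inner dict is the counter of the extended char list
    have hinner : (PySem.Dict.counter (pvChars P p.1)).insert p.2
        ((PySem.Dict.counter (pvChars P p.1)).getD p.2 0 + 1)
        = PySem.Dict.counter (pvChars (P ++ [p]) p.1) := by
      rw [pvChars_append_self, PySem.Dict.counter_append_singleton]
      rfl
    apply PySem.Dict.ext
    rw [pvStepA]
    simp only [hc, if_true, hgetD, hinner]
    rw [PySem.Dict.items_insert_of_contains _ _ hc]
    simp only [pvClosed, List.map_map]
    have hset : PySem.Set.ofList ((P ++ [p]).map Prod.fst) = PySem.Set.ofList (P.map Prod.fst) := by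
      rw [List.map_append, List.map_singleton, PySem.Set.ofList_append_singleton,
        PySem.Set.add_of_mem hmemS]
    rw [hset]
    apply List.map_congr_left
    intro g hgS
    by_cases hgp : g = p.1
    · subst hgp; simp
    · simp [Function.comp, hgp, pvChars_append_ne P p g hgp]
  · -- p.1 is a new key
    have hmemS : p.1 ∉ PySem.Set.ofList (P.map Prod.fst) := fun h =>
      hg ((PySem.Set.mem_ofList _ _).mp h)
    have hc : (pvClosed P).contains p.1 = false := by rw [hcont]; simpa using hmemS
    have hchars : pvChars (P ++ [p]) p.1 = [p.2] := by
      rw [pvChars_append_self, pvChars_nil_of_not_mem P p.1 hg]; rfl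
    have hcounter : PySem.Dict.counter (pvChars (P ++ [p]) p.1)
        = PySem.Dict.empty.insert p.2 (0 + 1) := by
      rw [hchars]
      show PySem.Dict.empty.insert p.2 (PySem.Dict.empty.getD p.2 0 + 1)
        = PySem.Dict.empty.insert p.2 (0 + 1)
      rw [PySem.Dict.getD_empty]
    apply PySem.Dict.ext
    rw [pvStepA]
    simp only [hc, if_false, Bool.false_eq_true, PySem.Dict.getD_insert_self,
      PySem.Dict.insert_insert_self, PySem.Dict.getD_empty]
    have hcnew : (pvClosed P).contains p.1 = false := hc
    rw [PySem.Dict.items_insert_of_not_contains _ _ hcnew]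
    simp only [pvClosed]
    have hset : PySem.Set.ofList ((P ++ [p]).map Prod.fst)
        = PySem.Set.ofList (P.map Prod.fst) ++ [p.1] := by
      rw [List.map_append, List.map_singleton, PySem.Set.ofList_append_singleton,
        PySem.Set.add_of_not_mem hmemS]
    rw [hset, List.map_append]
    congr 1
    · apply List.map_congr_left
      intro g hgS
      have hgp : g ≠ p.1 := fun h => hmemS (h ▸ hgS)
      rw [pvChars_append_ne P p g hgp]
    · simp [hcounter]

theorem pvFoldA_closed (P : List (String × String)) :
    P.foldl pvStepA PySem.Dict.empty = pvClosed P := by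
  induction P using List.reverseRecOn with
  | nil => rfl
  | append_singleton P p ih =>
    rw [List.foldl_append, List.foldl_cons, List.foldl_nil, ih, pvStepA_closed]

-- A's whole loop, through the pair list
theorem pvA_eq_closed (s : List Char) (k : Int) :
    ((PySem.List.pyRange 0 (PySem.List.len s - k) 1).foldl
      (fun (fc : PySem.Dict String (PySem.Dict String Int)) i =>
        let kmer := String.ofList (PySem.List.slice s (some i) (some (i + k)))
        let next_char := String.ofList [PySem.List.pyGetD s (i + k) ' ']
        let fc1 := if fc.contains kmer then fc else fc.insert kmer PySem.Dict.empty
        let inner := fc1.getD kmer PySem.Dict.empty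
        fc1.insert kmer (inner.insert next_char (inner.getD next_char 0 + 1)))
      PySem.Dict.empty) = pvClosed (pvPairs s k) := by
  rw [← pvFoldA_closed, pvPairs, List.foldl_map]
  rfl

-- ===== B-side lemmas =====

-- dedup of a mapped dedup list: Set.ofList ((Set.ofList P).map f) = Set.ofList (P.map f)
theorem pvSet_ofList_map_ofList {α β : Type} [BEq α] [LawfulBEq α] [BEq β] [LawfulBEq β]
    (P : List α) (f : α → β) :
    PySem.Set.ofList ((PySem.Set.ofList P).map f) = PySem.Set.ofList (P.map f) := by
  induction P using List.reverseRecOn with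
  | nil => rfl
  | append_singleton P p ih =>
    rw [PySem.Set.ofList_append_singleton, List.map_append, List.map_singleton,
      PySem.Set.ofList_append_singleton]
    by_cases hp : p ∈ PySem.Set.ofList P
    · have hpP : p ∈ P := (PySem.Set.mem_ofList _ _).mp hp
      rw [PySem.Set.add_of_mem hp, ih, PySem.Set.add_of_mem]
      exact (PySem.Set.mem_ofList _ _).mpr (List.mem_map.mpr ⟨p, hpP, rfl⟩)
    · rw [PySem.Set.add_of_not_mem hp, List.map_append, List.map_singleton,
        PySem.Set.ofList_append_singleton, ih]

-- the distinct followers of g among the deduped pairs, in order = dedup of the follower list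
theorem pvSet_filter_map_snd (P : List (String × String)) (g : String) :
    ((PySem.Set.ofList P).filter (fun q => q.1 == g)).map Prod.snd
      = PySem.Set.ofList (pvChars P g) := by
  induction P using List.reverseRecOn with
  | nil => rfl
  | append_singleton P p ih =>
    rw [PySem.Set.ofList_append_singleton]
    by_cases hp : p ∈ PySem.Set.ofList P
    · have hpP : p ∈ P := (PySem.Set.mem_ofList _ _).mp hp
      rw [PySem.Set.add_of_mem hp, ih]
      by_cases hg : p.1 = g
      · rw [← hg, pvChars_append_self, PySem.Set.ofList_append_singleton,
          PySem.Set.add_of_mem]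
        apply (PySem.Set.mem_ofList _ _).mpr
        exact List.mem_map.mpr ⟨p, List.mem_filter.mpr ⟨hpP, by simp⟩, rfl⟩
      · rw [pvChars_append_ne P p g (fun h => hg h.symm)]
    · rw [PySem.Set.add_of_not_mem hp, List.filter_append]
      by_cases hg : p.1 = g
      · have hfil : [p].filter (fun q => q.1 == g) = [p] := by simp [hg]
        rw [hfil, List.map_append, List.map_singleton, ih, ← hg, pvChars_append_self,
          PySem.Set.ofList_append_singleton, PySem.Set.add_of_not_mem]
        intro hmem
        have : p.2 ∈ pvChars P p.1 := (PySem.Set.mem_ofList _ _).mp hmem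
        obtain ⟨q, hq, hq2⟩ := List.mem_map.mp this
        have hq1 : q.1 = p.1 := by simpa using (List.mem_filter.mp hq).2
        exact hp ((PySem.Set.mem_ofList _ _).mpr
          (by rw [show p = q from Prod.ext hq1.symm hq2.symm]; exact (List.mem_filter.mp hq).1))
      · have hfil : [p].filter (fun q => q.1 == g) = [] := by simp [hg]
        rw [hfil, List.append_nil, ih, pvChars_append_ne P p g (fun h => hg h.symm)]

-- the multiplicity of the pair (g, ch) in P is the multiplicity of ch among g's followers
theorem pvCount_pair (P : List (String × String)) (q : String × String) :
    P.count q = (pvChars P q.1).count q.2 := by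
  rw [pvChars, List.count_eq_countP, List.count_eq_countP, List.countP_map,
    List.countP_filter]
  apply List.countP_congr
  intro x _
  simp only [Function.comp_def]
  constructor
  · intro h
    have : x = q := by simpa using h
    simp [this]
  · intro h
    have h2 : x.2 = q.2 ∧ x.1 = q.1 := by simpa using h
    simp [Prod.ext h2.2 h2.1]

-- pass 2 value at key g: the fold of modifies, read back at g
theorem pvRegroup_getD (c : String × String → Int) (Q : List (String × String))
    (d : PySem.Dict String (PySem.Dict String Int)) (g : String) :
    (Q.foldl (fun r q => r.modify q.1 PySem.Dict.empty (fun t => t.insert q.2 (c q))) d).getD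
        g PySem.Dict.empty
      = (Q.filter (fun q => q.1 == g)).foldl (fun t q => t.insert q.2 (c q))
          (d.getD g PySem.Dict.empty) := by
  induction Q generalizing d with
  | nil => rfl
  | cons q Q ih =>
    rw [List.foldl_cons, ih, List.filter_cons]
    by_cases hg : q.1 = g
    · simp [hg]
    · have : (q.1 == g) = false := by simp [hg]
      rw [this]
      simp only [Bool.false_eq_true, if_false]
      rw [PySem.Dict.getD_modify_of_ne]
      exact fun h => hg h.symm

-- inner fold of fresh inserts = the literal dict of its assignments
theorem pvInner_fresh (c : String × String → Int) (X : List (String × String))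
    (hnd : (X.map Prod.snd).Nodup) :
    X.foldl (fun t q => t.insert q.2 (c q)) PySem.Dict.empty
      = PySem.Dict.mk (X.map (fun q => (q.2, c q))) := by
  apply PySem.Dict.ext
  rw [PySem.Dict.items_foldl_insert_fresh X Prod.snd c PySem.Dict.empty
    (fun a _ => PySem.Dict.contains_empty _) hnd]
  rfl

-- B's passes 1+2, for any pair list: flat-count then regroup = the closed form
theorem pvB_eq_closed (P : List (String × String)) :
    ((P.foldl (fun (d : PySem.Dict (String × String) Int) pair =>
        d.insert pair (d.getD pair 0 + 1)) PySem.Dict.empty).items.foldl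
      (fun (r : PySem.Dict String (PySem.Dict String Int)) q =>
        r.modify q.1.1 PySem.Dict.empty (fun inner => inner.insert q.1.2 q.2))
      PySem.Dict.empty) = pvClosed P := by
  rw [PySem.Dict.foldl_insert_getD_add_one_eq_counter, PySem.Dict.items_counter,
    List.foldl_map]
  have hkeys : ((PySem.Set.ofList P).foldl
      (fun (r : PySem.Dict String (PySem.Dict String Int)) q =>
        r.modify q.1 PySem.Dict.empty (fun inner => inner.insert q.2 (P.count q : Int)))
      PySem.Dict.empty).keys = PySem.Set.ofList (P.map Prod.fst) := by
    rw [PySem.Dict.keys_foldl_modify_key (PySem.Set.ofList P) Prod.fst PySem.Dict.empty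
      (fun _ q => fun inner => inner.insert q.2 (P.count q : Int)) PySem.Dict.empty]
    rw [show (PySem.Dict.empty : PySem.Dict String (PySem.Dict String Int)).keys = [] from rfl]
    rw [show PySem.Set.update ([] : PySem.Set String) ((PySem.Set.ofList P).map Prod.fst)
        = PySem.Set.ofList ((PySem.Set.ofList P).map Prod.fst) from rfl]
    exact pvSet_ofList_map_ofList P Prod.fst
  have hnd : ((PySem.Set.ofList P).foldl
      (fun (r : PySem.Dict String (PySem.Dict String Int)) q =>
        r.modify q.1 PySem.Dict.empty (fun inner => inner.insert q.2 (P.count q : Int)))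
      PySem.Dict.empty).keys.Nodup := by
    rw [hkeys]; exact PySem.Set.nodup_ofList _
  apply PySem.Dict.ext
  rw [PySem.Dict.items_eq_map_keys _ hnd PySem.Dict.empty, hkeys]
  simp only [pvClosed]
  apply List.map_congr_left
  intro g hgS
  have hgetD := pvRegroup_getD (fun q => (P.count q : Int)) (PySem.Set.ofList P)
    PySem.Dict.empty g
  rw [hgetD]
  rw [show (PySem.Dict.empty : PySem.Dict String (PySem.Dict String Int)).getD g
      PySem.Dict.empty = PySem.Dict.empty from rfl]
  have hndX : (((PySem.Set.ofList P).filter (fun q => q.1 == g)).map Prod.snd).Nodup := by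
    rw [pvSet_filter_map_snd]; exact PySem.Set.nodup_ofList _
  rw [pvInner_fresh (fun q => (P.count q : Int)) _ hndX]
  congr 1
  apply PySem.Dict.ext
  rw [PySem.Dict.items_counter]
  rw [show (PySem.Dict.mk
      (((PySem.Set.ofList P).filter (fun q => q.1 == g)).map
        (fun q => (q.2, (P.count q : Int))))).items
    = ((PySem.Set.ofList P).filter (fun q => q.1 == g)).map
        (fun q => (q.2, (P.count q : Int))) from rfl]
  have hcongr : ((PySem.Set.ofList P).filter (fun q => q.1 == g)).map
      (fun q => (q.2, (P.count q : Int)))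
    = ((PySem.Set.ofList P).filter (fun q => q.1 == g)).map
      (fun q => (q.2, ((pvChars P g).count q.2 : Int))) := by
    apply List.map_congr_left
    intro q hq
    have hq1 : q.1 = g := by simpa using (List.mem_filter.mp hq).2
    rw [pvCount_pair P q, hq1]
  rw [hcongr, show ((PySem.Set.ofList P).filter (fun q => q.1 == g)).map
      (fun q => (q.2, ((pvChars P g).count q.2 : Int)))
    = (((PySem.Set.ofList P).filter (fun q => q.1 == g)).map Prod.snd).map
      (fun ch => (ch, ((pvChars P g).count ch : Int))) from by rw [List.map_map]; rfl]
  rw [pvSet_filter_map_snd]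

-- ===== VERDICT (by name: the statement is the Claim_ definition above) =====
theorem get_following_counts_spec : Claim_equal_get_following_counts := by
  intro sequence k _ _
  unfold Spec_get_following_counts get_following_counts get_following_counts_alt
  simp only []
  rw [pvA_eq_closed sequence.toList k]
  rw [show ((PySem.List.pyRange 0 (PySem.List.len sequence.toList - k) 1).map
      (fun i => (String.ofList (PySem.List.slice sequence.toList (some i) (some (i + k))),
                 String.ofList [PySem.List.pyGetD sequence.toList (i + k) ' '])))
    = pvPairs sequence.toList k from rfl]
  rw [pvB_eq_closed (pvPairs sequence.toList k)]
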